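-- pv_equiv track=rewrite | github.com/dagemawinegash/DSA_questions_solutions | A2SV G6 - Round #6 15-Mar-2025/F - Nahom's Array Dilemma 308065.py | helper
-- ===== SOURCE A (Python) =====
-- def helper(n, nums):
--   stack = []
--   prefix = [nums[0]]
--   for i in range(1, n):
--     prefix.append(prefix[i - 1] + nums[i])
--   prefix = [0] + prefix
--
--   for i in range(n):
--     while stack and nums[i] >= nums[stack[-1]]:
--       idx = stack.pop()
--       if prefix[i + 1] - prefix[idx] > nums[i]:
--         return False
--     stack.append(i)
--   return True
-- ===== SOURCE B (Python) =====
-- def helper(n, nums):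
--     # Each index i is only ever checked against its first later element that is
--     # >= nums[i]; scan forward to find it and compare the inclusive run sum.
--     for i in range(n):
--         s = nums[i]
--         for j in range(i + 1, n):
--             s += nums[j]
--             if nums[j] >= nums[i]:
--                 if s > nums[j]:
--                     return False
--                 break
--     return True
-- ===== Notes on version B (the rewrite author's own statement) =====
-- stated objective: alternative
-- what changed: Replaces the prefix-sum array plus monotonic stack with a direct nested scan: for each index i it walks forward accumulating the run sum until the first j with nums[j] >= nums[i] and checks that single pair; no stack and no prefix array are materialised.
import Mathlib
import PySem

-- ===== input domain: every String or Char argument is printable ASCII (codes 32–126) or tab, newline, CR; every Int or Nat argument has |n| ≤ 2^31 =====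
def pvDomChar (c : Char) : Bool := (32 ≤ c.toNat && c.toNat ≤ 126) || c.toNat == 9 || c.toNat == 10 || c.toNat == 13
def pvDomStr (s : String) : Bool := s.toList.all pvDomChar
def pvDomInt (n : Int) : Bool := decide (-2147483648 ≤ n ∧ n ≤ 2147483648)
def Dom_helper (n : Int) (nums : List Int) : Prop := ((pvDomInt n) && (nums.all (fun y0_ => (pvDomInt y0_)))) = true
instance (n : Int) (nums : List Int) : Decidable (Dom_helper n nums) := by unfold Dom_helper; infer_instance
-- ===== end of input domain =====

-- B drops A's prefix-sum array and monotonic stack for a direct nested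
-- next-greater-or-equal scan with a running sum (alternative decomposition, not faster).

-- ===== PORT A =====
def popA (nums pfx : List Int) (i : Int) : List Int → Option (List Int)
  | [] => some []
  | idx :: rest =>
    if PySem.List.pyGetD nums i 0 ≥ PySem.List.pyGetD nums idx 0 then
      if PySem.List.pyGetD pfx (i + 1) 0 - PySem.List.pyGetD pfx idx 0 > PySem.List.pyGetD nums i 0 then
        none
      else popA nums pfx i rest
    else some (idx :: rest)

def helper (n : Int) (nums : List Int) : Bool :=
  let pfx0 : List Int := [PySem.List.pyGetD nums 0 0]
  let pfx := (PySem.List.pyRange 1 n 1).foldl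
      (fun p i => p ++ [PySem.List.pyGetD p (i - 1) 0 + PySem.List.pyGetD nums i 0]) pfx0
  let pfx := 0 :: pfx
  match (PySem.List.pyRange 0 n 1).foldl
      (fun st i => match st with
        | none => none
        | some stk => (popA nums pfx i stk).map (fun s => i :: s)) (some []) with
  | none => false
  | some _ => true

-- ===== PORT B =====
def scanB (nums : List Int) (vi : Int) : Int → List Int → Bool
  | _, [] => true
  | s, j :: js =>
    let s' := s + PySem.List.pyGetD nums j 0
    if PySem.List.pyGetD nums j 0 ≥ vi then decide (s' ≤ PySem.List.pyGetD nums j 0)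
    else scanB nums vi s' js

def helper_alt (n : Int) (nums : List Int) : Bool :=
  (PySem.List.pyRange 0 n 1).all (fun i =>
    scanB nums (PySem.List.pyGetD nums i 0) (PySem.List.pyGetD nums i 0)
      (PySem.List.pyRange (i + 1) n 1))

-- ===== PRECONDITION & SPEC =====
-- Pre_ excludes exactly the inputs where A raises IndexError: nums == [] (A reads nums[0]
-- unconditionally) or n > len(nums) (the prefix loop reads nums[i] for i < n).
def Pre_helper (n : Int) (nums : List Int) : Prop := nums ≠ [] ∧ n ≤ (nums.length : Int)
instance (n : Int) (nums : List Int) : Decidable (Pre_helper n nums) := by unfold Pre_helper; infer_instance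
def pvWitness_helper : Int × List Int := (2, [5, 1])

def Spec_helper (n : Int) (nums : List Int) (out : Bool) : Prop := out = helper_alt n nums
instance (n : Int) (nums : List Int) (out : Bool) : Decidable (Spec_helper n nums out) := by unfold Spec_helper; infer_instance

-- ===== CLAIM (what is proved, stated in full; the proofs are below) =====
def Claim_equal_helper : Prop := ∀ (n : Int) (nums : List Int), Dom_helper n nums → Pre_helper n nums → Spec_helper n nums (helper n nums)
-- ===== LEMMAS AND PROOFS =====

def pvVal (nums : List Int) (k : Nat) : Int := nums.getD k 0

def pvS (nums : List Int) (k : Nat) : Int := (nums.take k).sum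

theorem pvS_succ (nums : List Int) (k : Nat) (h : k < nums.length) :
    pvS nums (k + 1) = pvS nums k + pvVal nums k := by
  rw [pvS, pvS, pvVal, List.take_succ_eq_append_getElem h, List.sum_append,
    List.getD_eq_getElem?_getD, List.getElem?_eq_getElem h]
  simp

theorem pvS_one (nums : List Int) : pvS nums 1 = nums.getD 0 0 := by
  cases nums <;> simp [pvS]

theorem pfx_eq (nums : List Int) (m : Nat) (h1 : 1 ≤ m) (h2 : m ≤ nums.length) :
    (PySem.List.pyRange 1 (m : Int) 1).foldl
      (fun p i => p ++ [PySem.List.pyGetD p (i - 1) 0 + PySem.List.pyGetD nums i 0])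
      [PySem.List.pyGetD nums 0 0]
    = (List.range m).map (fun k => pvS nums (k + 1)) := by
  induction m with
  | zero => omega
  | succ m ih =>
    rcases Nat.eq_or_lt_of_le h1 with h | h
    · -- m + 1 = 1
      have : m = 0 := by omega
      subst this
      simp [PySem.List.pyRange_one_eq_nil (by norm_num : (1:Int) ≤ 1), pvS_one,
        PySem.List.pyGetD_zero]
    · have hm1 : 1 ≤ m := by omega
      have hml : m < nums.length := by omega
      have hcast : ((m + 1 : Nat) : Int) = (m : Int) + 1 := by push_cast; ring
      rw [hcast, PySem.List.pyRange_one_succ_right (by exact_mod_cast hm1),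
        List.foldl_append, ih hm1 (by omega)]
      simp only [List.foldl_cons, List.foldl_nil]
      have hsub : ((m : Int) - 1) = ((m - 1 : Nat) : Int) := by omega
      rw [hsub, PySem.List.pyGetD_natCast, PySem.List.pyGetD_natCast,
        PySem.List.getD_map_range _ _ _ _ (by omega : m - 1 < m)]
      have : m - 1 + 1 = m := by omega
      rw [this, List.range_succ, List.map_append]
      simp [pvS_succ nums m hml, pvVal]

theorem pfx_getD (nums : List Int) (m k : Nat) (hk : k ≤ m) :
    PySem.List.pyGetD (0 :: (List.range m).map (fun k => pvS nums (k + 1))) (k : Int) 0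
      = pvS nums k := by
  rw [PySem.List.pyGetD_natCast]
  cases k with
  | zero => simp [pvS]
  | succ k => simpa using PySem.List.getD_map_range (fun k => pvS nums (k+1)) m k 0 (by omega)

theorem tw_dw {α : Type} (P : α → Bool) (l : List α)
    (h : l.Pairwise (fun a b => P b = true → P a = true)) :
    l.takeWhile P = l.filter P ∧ l.dropWhile P = l.filter (fun x => !P x) := by
  induction l with
  | nil => simp
  | cons a l ih =>
    rw [List.pairwise_cons] at h
    obtain ⟨ha, hl⟩ := h
    by_cases hPa : P a = true
    · obtain ⟨h1, h2⟩ := ih hl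
      simp [hPa, h1, h2]
    · have h1 : l.filter P = [] := by
        rw [List.filter_eq_nil_iff]
        intro b hb hPb
        exact hPa (ha b hb hPb)
      have h2 : l.filter (fun x => !P x) = l := by
        rw [List.filter_eq_self]
        intro b hb
        simp only [Bool.not_eq_true']
        by_contra hc
        exact hPa (ha b hb (by revert hc; cases P b <;> simp))
      simp [hPa, h1, h2]

theorem popA_eq (nums pfx : List Int) (i : Int) (l : List Int) :
    popA nums pfx i l =
      if (l.takeWhile (fun h => decide (PySem.List.pyGetD nums i 0 ≥ PySem.List.pyGetD nums h 0))).any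
           (fun h => decide (PySem.List.pyGetD pfx (i + 1) 0 - PySem.List.pyGetD pfx h 0 > PySem.List.pyGetD nums i 0))
      then none
      else some (l.dropWhile (fun h => decide (PySem.List.pyGetD nums i 0 ≥ PySem.List.pyGetD nums h 0))) := by
  induction l with
  | nil => simp [popA]
  | cons a l ih =>
    by_cases h1 : PySem.List.pyGetD nums i 0 ≥ PySem.List.pyGetD nums a 0
    · by_cases h2 : PySem.List.pyGetD pfx (i + 1) 0 - PySem.List.pyGetD pfx a 0 > PySem.List.pyGetD nums i 0
      · simp [popA, h1, h2]
      · simp [popA, h1, h2, ih]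
    · simp [popA, h1]

def pvNoGE (nums : List Int) (k i : Nat) : Bool :=
  (List.range i).all (fun m => decide (k < m → pvVal nums m < pvVal nums k))

def pvViol (nums : List Int) (k j : Nat) : Bool :=
  decide (pvS nums (j + 1) - pvS nums k > pvVal nums j)

def pvNge (nums : List Int) (k j : Nat) : Bool :=
  decide (k < j) && decide (pvVal nums j ≥ pvVal nums k) && pvNoGE nums k j

def pvGood (nums : List Int) (i : Nat) : Bool :=
  (List.range i).all (fun j => (List.range j).all (fun k => !(pvNge nums k j && pvViol nums k j)))

def pvStk (nums : List Int) (i : Nat) : List Int :=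
  (((List.range i).filter (fun k => pvNoGE nums k i)).reverse).map (fun k : Nat => (k : Int))

theorem noGE_succ (nums : List Int) (k i : Nat) :
    pvNoGE nums k (i + 1) = (pvNoGE nums k i && decide (k < i → pvVal nums i < pvVal nums k)) := by
  simp [pvNoGE, List.range_succ]

theorem noGE_self_succ (nums : List Int) (i : Nat) : pvNoGE nums i (i + 1) = true := by
  simp only [pvNoGE, List.all_eq_true, List.mem_range, decide_eq_true_eq]
  omega

theorem good_succ (nums : List Int) (i : Nat) :
    pvGood nums (i + 1)
      = (pvGood nums i && (List.range i).all (fun k => !(pvNge nums k i && pvViol nums k i))) := by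
  simp [pvGood, List.range_succ]

theorem pvVal_lt_of_mem (nums : List Int) {a b i : Nat} (ha : pvNoGE nums a i = true)
    (h1 : a < b) (h2 : b < i) : pvVal nums b < pvVal nums a := by
  simp only [pvNoGE, List.all_eq_true, List.mem_range, decide_eq_true_eq] at ha
  exact ha b h2 h1

theorem stk_zero (nums : List Int) : pvStk nums 0 = [] := by simp [pvStk]

theorem good_zero (nums : List Int) : pvGood nums 0 = true := by simp [pvGood]

theorem mainF (nums : List Int) (N : Nat) :
    ∀ i : Nat, i ≤ N →
      (PySem.List.pyRange 0 (i : Int) 1).foldl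
        (fun st j => match st with
          | none => none
          | some stk => (popA nums (0 :: (List.range N).map (fun k => pvS nums (k + 1))) j stk).map
              (fun s => j :: s))
        (some []) =
      (if pvGood nums i then some (pvStk nums i) else none) := by
  intro i
  induction i with
  | zero =>
    intro _
    simp [stk_zero, good_zero]
  | succ i ih =>
    intro hiN
    set pfx := (0 :: (List.range N).map (fun k => pvS nums (k + 1))) with hpfx
    have hcast : ((i + 1 : Nat) : Int) = (i : Int) + 1 := by push_cast; ring
    rw [hcast, PySem.List.pyRange_one_succ_right (by positivity), List.foldl_append,
      ih (by omega)]
    simp only [List.foldl_cons, List.foldl_nil]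
    set Q : Int → Bool := fun h => decide (PySem.List.pyGetD nums (i : Int) 0 ≥ PySem.List.pyGetD nums h 0) with hQ
    set Bd : Int → Bool := fun h => decide (PySem.List.pyGetD pfx ((i : Int) + 1) 0 - PySem.List.pyGetD pfx h 0 > PySem.List.pyGetD nums (i : Int) 0) with hBd
    have hvali : PySem.List.pyGetD nums (i : Int) 0 = pvVal nums i := by
      rw [PySem.List.pyGetD_natCast]; rfl
    have hvalk : ∀ k : Nat, PySem.List.pyGetD nums ((k : Nat) : Int) 0 = pvVal nums k := by
      intro k; rw [PySem.List.pyGetD_natCast]; rfl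
    have hpfxk : ∀ k : Nat, k ≤ N → PySem.List.pyGetD pfx ((k : Nat) : Int) 0 = pvS nums k := by
      intro k hk; rw [hpfx]; exact pfx_getD nums N k hk
    have hQk : ∀ k : Nat, Q ((k : Nat) : Int) = decide (pvVal nums i ≥ pvVal nums k) := by
      intro k; rw [hQ]; simp only [hvali, hvalk]
    have hBdk : ∀ k : Nat, k ≤ N → Bd ((k : Nat) : Int) = pvViol nums k i := by
      intro k hk
      rw [hBd]
      have h1 : ((i : Int) + 1) = ((i + 1 : Nat) : Int) := by push_cast; ring
      simp only [h1, hpfxk _ hk, hpfxk _ (by omega : i + 1 ≤ N), hvali]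
      rfl
    have hpw : (pvStk nums i).Pairwise (fun a b => Q b = true → Q a = true) := by
      rw [pvStk]
      have hbase : ((List.range i).filter (fun k => pvNoGE nums k i)).Pairwise (· < ·) :=
        List.Pairwise.filter _ List.pairwise_lt_range
      have hrev : (((List.range i).filter (fun k => pvNoGE nums k i)).reverse).Pairwise
          (fun a b => b < a) := List.pairwise_reverse.mpr hbase
      have hrel : (((List.range i).filter (fun k => pvNoGE nums k i)).reverse).Pairwise
          (fun (a b : Nat) => Q ((b : Nat) : Int) = true → Q ((a : Nat) : Int) = true) := by
        refine List.Pairwise.imp_of_mem ?_ hrev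
        intro a b hma hmb hab
        rw [List.mem_reverse, List.mem_filter, List.mem_range] at hma hmb
        intro hQb
        rw [hQk] at hQb ⊢
        have := pvVal_lt_of_mem nums hmb.2 hab hma.1
        simp only [decide_eq_true_eq] at hQb ⊢
        omega
      exact List.Pairwise.map (fun k : Nat => (k : Int)) (fun a b h => h) hrel
    set X := (List.range i).all (fun k => !(pvNge nums k i && pvViol nums k i)) with hX
    by_cases hg : pvGood nums i = true
    · rw [if_pos hg]
      show (popA nums pfx (i : Int) (pvStk nums i)).map (fun s => (i : Int) :: s)
          = if pvGood nums (i + 1) then some (pvStk nums (i + 1)) else none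
      rw [good_succ, hg, popA_eq, ← hQ, ← hBd, (tw_dw Q _ hpw).1, (tw_dw Q _ hpw).2, ← hX]
      have hXfalse : X = false ↔ ∃ k, k < i ∧ pvNge nums k i = true ∧ pvViol nums k i = true := by
        rw [hX, ← Bool.not_eq_true, List.all_eq_true]
        constructor
        · intro h
          by_contra hc
          push Not at hc
          apply h
          intro k hk
          simp only [List.mem_range] at hk
          have := hc k hk
          rcases Bool.eq_false_or_eq_true (pvNge nums k i) with h1 | h1
          · simp only [h1, Bool.true_and, Bool.not_eq_true']
            exact Bool.eq_false_iff.mpr (this h1)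
          · simp [h1]
        · rintro ⟨k, hk, h1, h2⟩ h
          have := h k (by simpa using hk)
          rw [h1, h2] at this
          simp at this
      have hany : ((pvStk nums i).filter Q).any Bd = !X := by
        rw [Bool.eq_iff_iff, Bool.not_eq_true', hXfalse, List.any_eq_true]
        constructor
        · rintro ⟨x, hx, hBdx⟩
          rw [List.mem_filter] at hx
          obtain ⟨hx, hQx⟩ := hx
          rw [pvStk] at hx
          simp only [List.mem_map, List.mem_reverse, List.mem_filter, List.mem_range] at hx
          obtain ⟨k, ⟨hki, hkg⟩, rfl⟩ := hx
          rw [hQk] at hQx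
          rw [hBdk k (by omega)] at hBdx
          exact ⟨k, hki, by simp [pvNge, hki, hkg, hQx], hBdx⟩
        · rintro ⟨k, hki, hng, hvl⟩
          have hng' := hng
          simp only [pvNge, Bool.and_eq_true, decide_eq_true_eq] at hng'
          obtain ⟨⟨_, hge⟩, hnoge⟩ := hng'
          refine ⟨(k : Nat), ?_, ?_⟩
          · rw [List.mem_filter]
            constructor
            · rw [pvStk]
              simp only [List.mem_map, List.mem_reverse, List.mem_filter, List.mem_range]
              exact ⟨k, ⟨hki, hnoge⟩, rfl⟩
            · rw [hQk]; simpa using hge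
          · rw [hBdk k (by omega)]; exact hvl
      rw [hany]
      by_cases hx : X = true
      · rw [hx]
        simp only [Bool.not_true, Bool.true_and, Bool.false_eq_true, if_false, if_true,
          Option.map_some]
        refine congrArg some ?_
        have hstep : (pvStk nums i).filter (fun x => !Q x)
            = (((List.range i).filter (fun k => pvNoGE nums k (i + 1))).reverse).map
              (fun k : Nat => (k : Int)) := by
          rw [pvStk, List.filter_map, List.filter_reverse, List.filter_filter]
          have hpt : ∀ k ∈ List.range i,
              (((fun x => !Q x) ∘ (fun k : Nat => (k : Int))) k && pvNoGE nums k i)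
                = pvNoGE nums k (i + 1) := by
            intro k hk
            simp only [List.mem_range] at hk
            simp only [Function.comp_apply, hQk, noGE_succ]
            by_cases hv : pvVal nums i < pvVal nums k
            · have h1 : (decide (pvVal nums i ≥ pvVal nums k)) = false := by
                simp only [decide_eq_false_iff_not]; omega
              have h2 : (decide (k < i → pvVal nums i < pvVal nums k)) = true := by
                simp only [decide_eq_true_eq]; omega
              simp [h1, h2]
            · have h1 : (decide (pvVal nums i ≥ pvVal nums k)) = true := by
                simp only [decide_eq_true_eq]; omega
              have h2 : (decide (k < i → pvVal nums i < pvVal nums k)) = false := by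
                simp only [decide_eq_false_iff_not]; omega
              simp [h1, h2]
          rw [List.filter_congr hpt]
        rw [hstep, pvStk, List.range_succ, List.filter_append]
        simp only [List.filter_cons, List.filter_nil, noGE_self_succ]
        simp [List.reverse_append]
      · rw [Bool.not_eq_true] at hx
        rw [hx]
        simp
    · rw [if_neg hg]
      have : pvGood nums (i + 1) = false := by
        rw [good_succ]
        simp [Bool.eq_false_iff.mpr hg]
      rw [this]
      rfl

theorem helperA (nums : List Int) (n : Int) (h1 : 1 ≤ n) (h2 : n ≤ (nums.length : Int)) :
    helper n nums = pvGood nums n.toNat := by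
  have hn : n = ((n.toNat : Nat) : Int) := (Int.toNat_of_nonneg (by omega)).symm
  have hN1 : 1 ≤ n.toNat := by omega
  have hNlen : n.toNat ≤ nums.length := by omega
  simp only [helper]
  rw [hn]
  simp only [Int.toNat_natCast]
  rw [pfx_eq nums n.toNat hN1 hNlen, mainF nums n.toNat n.toNat (le_refl _)]
  by_cases hg : pvGood nums n.toNat = true
  · rw [if_pos hg, hg]
  · rw [if_neg hg, Bool.eq_false_iff.mpr hg]

theorem noGE_iff (nums : List Int) (k i : Nat) :
    pvNoGE nums k i = true ↔ ∀ m, k < m → m < i → pvVal nums m < pvVal nums k := by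
  simp only [pvNoGE, List.all_eq_true, List.mem_range, decide_eq_true_eq]
  constructor
  · intro h m h1 h2; exact h m h2 h1
  · intro h m h1 h2; exact h m h2 h1

theorem scanB_spec (nums : List Int) (N : Nat) (hNlen : N ≤ nums.length) (i : Nat) :
    ∀ d j, j + d = N → i < j →
      (∀ t, i < t → t < j → pvVal nums t < pvVal nums i) →
      (scanB nums (pvVal nums i) (pvS nums j - pvS nums i) (PySem.List.pyRange (j : Int) (N : Int) 1) = true
        ↔ ∀ m, j ≤ m → m < N → pvNge nums i m = true → pvViol nums i m = false) := by
  intro d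
  induction d with
  | zero =>
    intro j hj hij hprev
    have hjN : j = N := by omega
    subst hjN
    rw [PySem.List.pyRange_one_eq_nil (le_refl _)]
    simp only [scanB]
    constructor
    · intro _ m h1 h2; omega
    · intro _; trivial
  | succ d ihd =>
    intro j hj hij hprev
    have hjN : j < N := by omega
    have hjl : j < nums.length := by omega
    rw [PySem.List.pyRange_one_cons (by exact_mod_cast hjN)]
    have hcast : ((j : Int) + 1) = ((j + 1 : Nat) : Int) := by push_cast; ring
    have hvj : PySem.List.pyGetD nums ((j : Nat) : Int) 0 = pvVal nums j := by
      rw [PySem.List.pyGetD_natCast]; rfl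
    have hs : pvS nums j - pvS nums i + pvVal nums j = pvS nums (j + 1) - pvS nums i := by
      have := pvS_succ nums j hjl; omega
    simp only [scanB, hvj, hs, hcast]
    by_cases hge : pvVal nums j ≥ pvVal nums i
    · rw [if_pos hge]
      have hngej : pvNge nums i j = true := by
        simp only [pvNge, Bool.and_eq_true, decide_eq_true_eq]
        exact ⟨⟨hij, hge⟩, (noGE_iff nums i j).mpr hprev⟩
      constructor
      · intro hle m h1 h2 hng
        rcases Nat.eq_or_lt_of_le h1 with h | h
        · subst h
          simp only [pvViol, decide_eq_false_iff_not]
          simpa using hle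
        · exfalso
          simp only [pvNge, Bool.and_eq_true, decide_eq_true_eq] at hng
          have := (noGE_iff nums i m).mp hng.2 j hij h
          omega
      · intro h
        have := h j (le_refl _) hjN hngej
        simp only [pvViol, decide_eq_false_iff_not] at this
        simpa using this
    · rw [if_neg hge]
      have hprev' : ∀ t, i < t → t < j + 1 → pvVal nums t < pvVal nums i := by
        intro t h1 h2
        rcases Nat.lt_succ_iff_lt_or_eq.mp h2 with h | h
        · exact hprev t h1 h
        · subst h; omega
      rw [ihd (j + 1) (by omega) (by omega) hprev']
      constructor
      · intro h m h1 h2 hng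
        rcases Nat.eq_or_lt_of_le h1 with he | he
        · exfalso
          subst he
          simp only [pvNge, Bool.and_eq_true, decide_eq_true_eq] at hng
          omega
        · exact h m (by omega) h2 hng
      · intro h m h1 h2 hng
        exact h m (by omega) h2 hng

theorem helperB (nums : List Int) (n : Int) (h0 : 0 ≤ n) (h2 : n ≤ (nums.length : Int)) :
    helper_alt n nums = pvGood nums n.toNat := by
  have hn : n = ((n.toNat : Nat) : Int) := (Int.toNat_of_nonneg h0).symm
  set N := n.toNat with hNdef
  have hNlen : N ≤ nums.length := by omega
  rw [Bool.eq_iff_iff]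
  have hB : helper_alt n nums = true ↔
      ∀ k, k < N → ∀ m, k < m → m < N → pvNge nums k m = true → pvViol nums k m = false := by
    rw [helper_alt, List.all_eq_true]
    constructor
    · intro h k hk m h1 h2 hng
      have hmem : ((k : Nat) : Int) ∈ PySem.List.pyRange 0 n 1 := by
        rw [PySem.List.mem_pyRange_one, hn]
        constructor
        · positivity
        · exact_mod_cast hk
      have := h _ hmem
      rw [PySem.List.pyGetD_natCast] at this
      have hvk : nums.getD k 0 = pvVal nums k := rfl
      have hkl : k < nums.length := by omega
      have hstart : pvVal nums k = pvS nums (k + 1) - pvS nums k := by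
        have := pvS_succ nums k hkl; omega
      rw [hvk] at this
      nth_rewrite 2 [hstart] at this
      have hcast : ((k : Int) + 1) = ((k + 1 : Nat) : Int) := by push_cast; ring
      rw [hcast, hn] at this
      rw [(scanB_spec nums N hNlen k (N - (k + 1)) (k + 1) (by omega) (by omega)
        (by intro t ht1 ht2; omega)).mp this m (by omega) h2 hng]
    · intro h x hx
      rw [hn, PySem.List.mem_pyRange_one] at hx
      obtain ⟨hx0, hxN⟩ := hx
      have hk : x = ((x.toNat : Nat) : Int) := (Int.toNat_of_nonneg hx0).symm
      set k := x.toNat with hkdef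
      have hkN : k < N := by omega
      have hkl : k < nums.length := by omega
      rw [hk, PySem.List.pyGetD_natCast]
      have hvk : nums.getD k 0 = pvVal nums k := rfl
      have hstart : pvVal nums k = pvS nums (k + 1) - pvS nums k := by
        have := pvS_succ nums k hkl; omega
      have hcast : ((k : Int) + 1) = ((k + 1 : Nat) : Int) := by push_cast; ring
      rw [hvk]
      nth_rewrite 2 [hstart]
      rw [hcast, hn]
      rw [(scanB_spec nums N hNlen k (N - (k + 1)) (k + 1) (by omega) (by omega)
        (by intro t ht1 ht2; omega))]
      intro m h1 h2 hng
      exact h k hkN m (by omega) h2 hng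
  have hG : pvGood nums N = true ↔
      ∀ k, k < N → ∀ m, k < m → m < N → pvNge nums k m = true → pvViol nums k m = false := by
    rw [pvGood, List.all_eq_true]
    constructor
    · intro h k hk m h1 h2 hng
      have := h m (by simp only [List.mem_range]; omega)
      rw [List.all_eq_true] at this
      have := this k (by simp only [List.mem_range]; omega)
      rw [hng] at this
      simpa using this
    · intro h m hm
      rw [List.all_eq_true]
      intro k hk
      simp only [List.mem_range] at hm hk
      by_cases h1 : pvNge nums k m = true
      · have hklt : k < m := by
          simp only [pvNge, Bool.and_eq_true, decide_eq_true_eq] at h1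
          omega
        rw [h1, h k (by omega) m hklt hm h1]
        simp
      · rw [Bool.not_eq_true] at h1
        rw [h1]
        simp
  rw [hB, hG]

-- ===== VERDICT (by name: the statement is the Claim_ definition above) =====
theorem helper_spec : Claim_equal_helper := by
  intro n nums _ hpre
  obtain ⟨hne, hlen⟩ := hpre
  show helper n nums = helper_alt n nums
  by_cases h1 : 1 ≤ n
  · rw [helperA nums n h1 hlen, helperB nums n (by omega) hlen]
  · have hr0 : PySem.List.pyRange 0 n 1 = [] := PySem.List.pyRange_one_eq_nil (by omega)
    have hr1 : PySem.List.pyRange 1 n 1 = [] := PySem.List.pyRange_one_eq_nil (by omega)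
    simp [helper, helper_alt, hr0, hr1]
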